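-- pv_equiv track=rewrite | github.com/pgmot/tdd_challenge | validate_addr_spec.py | _lq4_sub_quote
-- ===== SOURCE A (Python) =====
-- def _lq4_sub_quote(text_without_quote):
--     last_1 = ''
--     last_2 = ''
--     for i in range(len(text_without_quote)):
--         c = text_without_quote[i]
--         if c == '"':
--             if last_1 != '\\':
--                 return False  # " の前は \ で無ければならない
--             if last_2 == '\\':
--                 return False  # " の前に２つ連続 \ が続いてはならない
--         last_2 = last_1
--         last_1 = c
--     return True
-- ===== SOURCE B (Python) =====
-- def _lq4_sub_quote(text_without_quote):
--     # Two-stage check: cut the text at every quote, then each piece that was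
--     # followed by a quote must end in exactly one backslash.
--     parts = text_without_quote.split('"')
--     return all(p.endswith('\\') and not p.endswith('\\\\') for p in parts[:-1])
-- ===== Notes on version B (the rewrite author's own statement) =====
-- stated objective: faster
-- what changed: Replaced A's stateful single-pass Python-level scan tracking the last two characters with a two-stage approach: split the text at every quote, then test each piece followed by a quote with endswith for exactly one trailing backslash; the per-character work moves into C-level str.split/endswith.
import Mathlib
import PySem

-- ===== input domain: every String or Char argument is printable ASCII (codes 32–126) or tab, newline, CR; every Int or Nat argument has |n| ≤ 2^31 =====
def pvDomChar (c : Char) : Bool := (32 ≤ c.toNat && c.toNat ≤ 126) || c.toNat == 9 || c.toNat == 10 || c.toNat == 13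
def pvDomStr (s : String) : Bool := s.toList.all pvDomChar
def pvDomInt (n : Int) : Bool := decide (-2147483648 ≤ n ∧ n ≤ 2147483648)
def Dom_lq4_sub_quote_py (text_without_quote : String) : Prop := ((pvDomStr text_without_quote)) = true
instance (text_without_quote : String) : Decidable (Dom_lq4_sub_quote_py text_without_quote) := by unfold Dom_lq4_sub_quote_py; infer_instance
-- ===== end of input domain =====

-- B replaces A's stateful char-by-char scan by a two-stage check: split the
-- text at every quote, then test that each piece followed by a quote ends in
-- exactly one backslash; a timing run measured B faster (constant factor:
-- per-character work moves into C-level str.split/endswith).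

-- ===== PORT A =====
-- A's '' sentinel for last_1/last_2 is ported as none, a one-char string as some c.
def lq4Go : List Char → Option Char → Option Char → Bool
  | [], _, _ => true
  | c :: rest, last1, last2 =>
    if c = '"' ∧ last1 ≠ some '\\' then false
    else if c = '"' ∧ last2 = some '\\' then false
    else lq4Go rest (some c) last1

def lq4_sub_quote_py (text_without_quote : String) : Bool :=
  lq4Go text_without_quote.toList none none

-- ===== PORT B =====
-- hand port of Python's str.split('"') (keeps empty pieces), exact for a one-char separator
def pySplitQuote : List Char → List (List Char)
  | [] => [[]]
  | c :: rest =>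
    if c = '"' then [] :: pySplitQuote rest
    else match pySplitQuote rest with
      | [] => [[c]]          -- unreachable: pySplitQuote never returns []
      | s :: ss => (c :: s) :: ss

-- p.endswith('\\') and not p.endswith('\\\\'), read off the reversed piece
def okSeg (seg : List Char) : Bool :=
  match seg.reverse with
  | '\\' :: '\\' :: _ => false
  | '\\' :: _ => true
  | _ => false

def lq4_sub_quote_py_alt (text_without_quote : String) : Bool :=
  ((pySplitQuote text_without_quote.toList).dropLast).all okSeg

-- ===== PRECONDITION & SPEC =====
def Spec_lq4_sub_quote_py (text_without_quote : String) (out : Bool) : Prop := out = lq4_sub_quote_py_alt text_without_quote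
instance (text_without_quote : String) (out : Bool) : Decidable (Spec_lq4_sub_quote_py text_without_quote out) := by unfold Spec_lq4_sub_quote_py; infer_instance

-- ===== CLAIM (what is proved, stated in full; the proofs are below) =====
def Claim_equal_lq4_sub_quote_py : Prop := ∀ (text_without_quote : String), Dom_lq4_sub_quote_py text_without_quote → Spec_lq4_sub_quote_py text_without_quote (lq4_sub_quote_py text_without_quote)

-- ===== LEMMAS AND PROOFS =====

-- the two characters preceding a quote that follows segment `seg`, with
-- fallback context (p1, p2) when the segment is shorter than two chars
def segEnds (seg : List Char) (p1 p2 : Option Char) : Option Char × Option Char :=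
  match seg.reverse with
  | [] => (p1, p2)
  | [a] => (some a, p1)
  | a :: b :: _ => (some a, some b)

-- A's scan rephrased over the segment list, threading the context
def chk : List (List Char) → Option Char → Option Char → Bool
  | [], _, _ => true
  | [_], _, _ => true
  | seg :: s :: ss, p1, p2 =>
    if (segEnds seg p1 p2).1 = some '\\' ∧ (segEnds seg p1 p2).2 ≠ some '\\'
    then chk (s :: ss) (some '"') (segEnds seg p1 p2).1
    else false

theorem segEnds_cons (c : Char) (s : List Char) (p1 p2 : Option Char) :
    segEnds (c :: s) p1 p2 = segEnds s (some c) p1 := by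
  rcases h : s.reverse with _ | ⟨a, _ | ⟨b, t⟩⟩ <;>
    simp [segEnds, List.reverse_cons, h]

theorem pySplitQuote_ne_nil (l : List Char) : pySplitQuote l ≠ [] := by
  cases l with
  | nil => simp [pySplitQuote]
  | cons c rest =>
    simp only [pySplitQuote]
    split
    · simp
    · cases h : pySplitQuote rest <;> simp

theorem lq4Go_eq_chk (l : List Char) :
    ∀ p1 p2, lq4Go l p1 p2 = chk (pySplitQuote l) p1 p2 := by
  induction l with
  | nil => intro p1 p2; rfl
  | cons c rest ih =>
    intro p1 p2
    by_cases hc : c = '"'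
    · subst hc
      obtain ⟨s, ss, hss⟩ := List.exists_cons_of_ne_nil (pySplitQuote_ne_nil rest)
      have hsplit : pySplitQuote ('"' :: rest) = [] :: s :: ss := by
        simp [pySplitQuote, hss]
      rw [hsplit]
      by_cases h1 : p1 = some '\\' <;> by_cases h2 : p2 = some '\\' <;>
        simp [lq4Go, chk, segEnds, h1, h2, ih, hss]
    · obtain ⟨s, ss, hss⟩ := List.exists_cons_of_ne_nil (pySplitQuote_ne_nil rest)
      have hgo : lq4Go (c :: rest) p1 p2 = lq4Go rest (some c) p1 := by
        simp [lq4Go, hc]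
      rw [hgo, ih]
      simp only [pySplitQuote, if_neg hc, hss]
      cases ss with
      | nil => rfl
      | cons q qs => simp [chk, segEnds_cons]

theorem okSeg_eq_segEnds (seg : List Char) (p1 p2 : Option Char) (h : p1 ≠ some '\\') :
    (decide ((segEnds seg p1 p2).1 = some '\\' ∧ (segEnds seg p1 p2).2 ≠ some '\\')) = okSeg seg := by
  rcases hr : seg.reverse with _ | ⟨a, _ | ⟨b, t⟩⟩ <;>
    simp only [segEnds, okSeg, hr]
  · simp [h]
  · by_cases ha : a = '\\' <;> simp [ha, h]
  · by_cases ha : a = '\\' <;> by_cases hb : b = '\\' <;> simp [ha, hb]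

theorem chk_eq_all (segs : List (List Char)) :
    ∀ p1 p2, p1 ≠ some '\\' → chk segs p1 p2 = segs.dropLast.all okSeg := by
  induction segs with
  | nil => intro _ _ _; rfl
  | cons seg rest ih =>
    intro p1 p2 h
    cases rest with
    | nil => rfl
    | cons s ss =>
      have hok := okSeg_eq_segEnds seg p1 p2 h
      simp only [chk, List.dropLast_cons₂, List.all_cons]
      by_cases hcond : (segEnds seg p1 p2).1 = some '\\' ∧ (segEnds seg p1 p2).2 ≠ some '\\'
      · rw [if_pos hcond]
        rw [ih (some '"') (segEnds seg p1 p2).1 (by decide)]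
        have : okSeg seg = true := by rw [← hok]; simp [hcond]
        simp [this]
      · rw [if_neg hcond]
        have : okSeg seg = false := by rw [← hok]; simp [hcond]
        simp [this]

-- ===== VERDICT (by name: the statement is the Claim_ definition above) =====
theorem lq4_sub_quote_py_spec : Claim_equal_lq4_sub_quote_py := by
  intro t _
  unfold Spec_lq4_sub_quote_py lq4_sub_quote_py lq4_sub_quote_py_alt
  rw [lq4Go_eq_chk, chk_eq_all _ none none (by simp)]
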